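-- pv_equiv track=rewrite | github.com/ElliottBarbeau/Leetcode | Problems/Words Concatenation.py | find_word_concatenation
-- ===== SOURCE A (Python) =====
-- def find_word_concatenation(str1, words):
--     if len(words) == 0 or len(words[0]) == 0:
--         return []
--
--     word_frequency = {}
--
--     for word in words:
--         if word not in word_frequency:
--             word_frequency[word] = 0
--         word_frequency[word] += 1
--
--     result_indices = []
--     words_count = len(words)
--     words_length = len(words[0])
--
--     for i in range(words_length + 1):
--         words_seen = {}
--         for j in range(0, words_count):
--             next_word_index = i + j * words_length
--             word = str1[next_word_index: next_word_index + words_length]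
--             if word not in word_frequency:
--                 break
--
--             if word not in words_seen:
--                 words_seen[word] = 0
--             words_seen[word] += 1
--
--             if words_seen[word] > word_frequency.get(word, 0):
--                 break
--
--             if j + 1 == words_count:
--                 result_indices.append(i)
--
--
--     return result_indices
-- ===== SOURCE B (Python) =====
-- def find_word_concatenation(str1, words):
--     if len(words) == 0 or len(words[0]) == 0:
--         return []
--     wl = len(words[0])
--     n = len(words)
--     target = sorted(words)
--     result = []
--     for i in range(wl + 1):
--         window = [str1[i + j * wl: i + j * wl + wl] for j in range(n)]
--         if sorted(window) == target:
--             result.append(i)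
--     return result
-- ===== Notes on version B (the rewrite author's own statement) =====
-- stated objective: simpler
-- what changed: A's incremental per-window dict counting with two early-break conditions is replaced by building each window's list of slices and comparing sorted(window) to the precomputed sorted(words); the dicts and the break logic disappear (A's outer range(words_length+1) bound is kept verbatim).
import Mathlib
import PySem

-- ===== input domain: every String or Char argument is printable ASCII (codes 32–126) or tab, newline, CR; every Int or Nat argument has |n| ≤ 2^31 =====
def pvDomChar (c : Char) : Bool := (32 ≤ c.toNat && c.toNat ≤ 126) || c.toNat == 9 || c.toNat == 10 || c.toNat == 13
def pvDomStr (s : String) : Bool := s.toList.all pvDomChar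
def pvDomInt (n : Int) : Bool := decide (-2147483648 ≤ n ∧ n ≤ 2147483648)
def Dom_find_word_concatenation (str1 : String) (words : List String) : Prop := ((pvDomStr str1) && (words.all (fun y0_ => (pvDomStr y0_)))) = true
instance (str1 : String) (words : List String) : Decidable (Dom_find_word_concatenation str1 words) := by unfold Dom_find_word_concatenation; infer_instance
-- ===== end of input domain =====

-- B replaces A's incremental count-and-break inner loop by building each window of slices and
-- comparing sorted(window) to sorted(words); objective: simpler (A's accidental outer bound range(wl+1) is kept).

-- ===== PORT A =====
-- the inner 'for j in range(0, words_count)' loop with its two breaks; returns whether i was appended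
def fwcGo (str1 : String) (wf : PySem.Dict String Int) (wl n i : Nat) :
    Nat → Nat → PySem.Dict String Int → Bool
  | 0, _, _ => false
  | rem + 1, j, seen =>
    let idx := i + j * wl
    let word := PySem.Str.slice str1 (some (idx : Int)) (some ((idx : Int) + (wl : Int)))
    if !(wf.contains word) then false
    else
      let seen1 := if !(seen.contains word) then seen.insert word 0 else seen
      let seen2 := seen1.insert word (seen1.getD word 0 + 1)
      if seen2.getD word 0 > wf.getD word 0 then false
      else if j + 1 == n then true
      else fwcGo str1 wf wl n i rem (j + 1) seen2

def find_word_concatenation (str1 : String) (words : List String) : List Int :=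
  if words.length == 0 || (words.headD "").toList.length == 0 then []
  else
    let word_frequency := words.foldl
      (fun d w =>
        let d1 := if !(d.contains w) then d.insert w 0 else d
        d1.insert w (d1.getD w 0 + 1)) PySem.Dict.empty
    let words_count := words.length
    let words_length := (words.headD "").toList.length
    (List.range (words_length + 1)).foldl
      (fun acc i =>
        if fwcGo str1 word_frequency words_length words_count i words_count 0 PySem.Dict.empty
        then acc ++ [(i : Int)] else acc) []

-- ===== PORT B =====
def find_word_concatenation_alt (str1 : String) (words : List String) : List Int :=
  if words.length == 0 || (words.headD "").toList.length == 0 then []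
  else
    let wl := (words.headD "").toList.length
    let n := words.length
    let target := PySem.List.sorted words (fun x => x) false
    (List.range (wl + 1)).foldl
      (fun acc i =>
        let window := (List.range n).map (fun j =>
          PySem.Str.slice str1 (some ((i + j * wl : Nat) : Int))
            (some ((i + j * wl + wl : Nat) : Int)))
        if PySem.List.sorted window (fun x => x) false == target
        then acc ++ [(i : Int)] else acc) []

-- ===== PRECONDITION & SPEC =====
def Spec_find_word_concatenation (str1 : String) (words : List String) (out : List Int) : Prop := out = find_word_concatenation_alt str1 words
instance (str1 : String) (words : List String) (out : List Int) : Decidable (Spec_find_word_concatenation str1 words out) := by unfold Spec_find_word_concatenation; infer_instance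

-- ===== CLAIM (what is proved, stated in full; the proofs are below) =====
def Claim_equal_find_word_concatenation : Prop := ∀ (str1 : String) (words : List String), Dom_find_word_concatenation str1 words → Spec_find_word_concatenation str1 words (find_word_concatenation str1 words)

-- ===== LEMMAS AND PROOFS =====


def fwcSlice (str1 : String) (wl i k : Nat) : String :=
  PySem.Str.slice str1 (some ((i + k * wl : Nat) : Int)) (some ((i + k * wl + wl : Nat) : Int))

def fwcWindow (str1 : String) (wl n i : Nat) : List String :=
  (List.range n).map (fwcSlice str1 wl i)

theorem fwc_step_eq (d : PySem.Dict String Int) (w : String) :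
    (let d1 := if !(d.contains w) then d.insert w 0 else d
     d1.insert w (d1.getD w 0 + 1)) = d.insert w (d.getD w 0 + 1) := by
  by_cases h : d.contains w = true
  · simp [h]
  · simp only [Bool.not_eq_true] at h
    rw [PySem.Dict.getD_of_not_contains d (0 : Int) h]
    simp [h, PySem.Dict.getD_insert_self, PySem.Dict.insert_insert_self]

theorem fwc_wf_eq (words : List String) :
    words.foldl (fun d w =>
        let d1 := if !(d.contains w) then d.insert w 0 else d
        d1.insert w (d1.getD w 0 + 1)) PySem.Dict.empty = PySem.Dict.counter words := by
  have : (fun (d : PySem.Dict String Int) w =>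
      let d1 := if !(d.contains w) then d.insert w 0 else d
      d1.insert w (d1.getD w 0 + 1)) = fun d w => d.insert w (d.getD w 0 + 1) := by
    funext d w; exact fwc_step_eq d w
  rw [this, PySem.Dict.foldl_insert_getD_add_one_eq_counter]

theorem fwc_window_take_succ (str1 : String) (wl n i j : Nat) (hj : j < n) :
    (fwcWindow str1 wl n i).take (j + 1)
      = (fwcWindow str1 wl n i).take j ++ [fwcSlice str1 wl i j] := by
  have hlen : j < (fwcWindow str1 wl n i).length := by simp [fwcWindow, hj]
  rw [List.take_add_one]
  congr 1
  rw [List.getElem?_eq_getElem hlen]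
  simp [fwcWindow]

theorem fwc_step_eq' (d : PySem.Dict String Int) (w : String) :
    ((if !(d.contains w) then d.insert w 0 else d).insert w
      ((if !(d.contains w) then d.insert w 0 else d).getD w 0 + 1)) = d.insert w (d.getD w 0 + 1) := by
  by_cases h : d.contains w = true
  · simp [h]
  · simp only [Bool.not_eq_true] at h
    rw [PySem.Dict.getD_of_not_contains d (0 : Int) h]
    simp [h, PySem.Dict.getD_insert_self, PySem.Dict.insert_insert_self]

theorem fwc_cast_eq (i j wl : Nat) :
    ((i + j * wl : Nat) : Int) + (wl : Int) = ((i + j * wl + wl : Nat) : Int) := by push_cast; ring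

theorem fwcGo_iff (str1 : String) (words : List String) (wl i : Nat) :
    ∀ (rem j : Nat) (seen : PySem.Dict String Int),
    rem + j = words.length → 0 < rem →
    (∀ w, seen.getD w 0 = (((fwcWindow str1 wl words.length i).take j).count w : Int)) →
    (fwcGo str1 (PySem.Dict.counter words) wl words.length i rem j seen = true ↔
      ∀ k, j ≤ k → k < words.length →
        fwcSlice str1 wl i k ∈ words ∧
        (((fwcWindow str1 wl words.length i).take (k + 1)).count (fwcSlice str1 wl i k)
          ≤ words.count (fwcSlice str1 wl i k)) ) := by
  intro rem
  induction rem with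
  | zero =>
    intro j seen _ h0 _
    exact absurd h0 (by omega)
  | succ r ih =>
    intro j seen hsum _ hinv
    have hjn : j < words.length := by omega
    have hcast := fwc_cast_eq i j wl
    have hcnt_succ : ∀ w, ((fwcWindow str1 wl words.length i).take (j + 1)).count w
        = ((fwcWindow str1 wl words.length i).take j).count w
          + if fwcSlice str1 wl i j = w then 1 else 0 := by
      intro w
      rw [fwc_window_take_succ str1 wl words.length i j hjn, List.count_append]
      simp [List.count_singleton, beq_iff_eq]
    simp only [fwcGo, hcast]
    rw [fwc_step_eq']
    by_cases hmem : fwcSlice str1 wl i j ∈ words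
    · have hc : (PySem.Dict.counter words).contains (fwcSlice str1 wl i j) = true := by
        rw [PySem.Dict.contains_counter]; exact List.contains_iff_mem.mpr hmem
      rw [fwcSlice] at hc
      simp only [hc, Bool.not_true, Bool.false_eq_true, if_false]
      have hgetD : (seen.insert (fwcSlice str1 wl i j) (seen.getD (fwcSlice str1 wl i j) 0 + 1)).getD (fwcSlice str1 wl i j) 0
          = (((fwcWindow str1 wl words.length i).take (j + 1)).count (fwcSlice str1 wl i j) : Int) := by
        rw [PySem.Dict.getD_insert_self, hinv, hcnt_succ]; simp
      rw [fwcSlice] at hgetD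
      rw [hgetD, PySem.Dict.getD_counter]
      by_cases hcnt : ((fwcWindow str1 wl words.length i).take (j + 1)).count (fwcSlice str1 wl i j)
          ≤ words.count (fwcSlice str1 wl i j)
      · have hcond : ¬ ((((fwcWindow str1 wl words.length i).take (j + 1)).count (fwcSlice str1 wl i j) : Int)
            > (List.count (fwcSlice str1 wl i j) words : Int)) := by
          rw [fwcSlice]; rw [fwcSlice] at hcnt
          push_cast; exact not_lt.mpr (by exact_mod_cast hcnt)
        rw [fwcSlice] at hcond
        rw [if_neg hcond]
        by_cases hlast : j + 1 = words.length
        · have : (j + 1 == words.length) = true := by simp [hlast]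
          rw [this]
          simp only [if_true]
          constructor
          · intro _ k hk1 hk2
            have : k = j := by omega
            subst this
            exact ⟨hmem, hcnt⟩
          · intro _; trivial
        · have hbeq : (j + 1 == words.length) = false := by simp [hlast]
          rw [hbeq]
          simp only [Bool.false_eq_true, if_false]
          have hinv2 : ∀ w, ((seen.insert (fwcSlice str1 wl i j) (seen.getD (fwcSlice str1 wl i j) 0 + 1))).getD w 0
              = (((fwcWindow str1 wl words.length i).take (j + 1)).count w : Int) := by
            intro w
            rw [PySem.Dict.getD_insert, hcnt_succ w]
            by_cases hw : w = fwcSlice str1 wl i j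
            · rw [if_pos hw, hinv, hw]; simp
            · rw [if_neg hw, hinv]
              have : ¬ (fwcSlice str1 wl i j = w) := fun h => hw h.symm
              simp [this]
          rw [fwcSlice] at hinv2
          rw [ih (j + 1) _ (by omega) (by omega) hinv2]
          constructor
          · intro h k hk1 hk2
            rcases Nat.eq_or_lt_of_le hk1 with heq | hlt
            · subst heq; exact ⟨hmem, hcnt⟩
            · exact h k hlt hk2
          · intro h k hk1 hk2; exact h k (by omega) hk2
      · have hcond : ((((fwcWindow str1 wl words.length i).take (j + 1)).count (fwcSlice str1 wl i j) : Int)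
            > (List.count (fwcSlice str1 wl i j) words : Int)) := by
          have := Nat.lt_of_not_le hcnt
          exact_mod_cast this
        rw [fwcSlice] at hcond
        rw [if_pos hcond]
        constructor
        · intro h; exact absurd h (by simp)
        · intro h
          exact absurd (h j le_rfl hjn).2 hcnt
    · have hc : (PySem.Dict.counter words).contains (fwcSlice str1 wl i j) = false := by
        rw [PySem.Dict.contains_counter]
        exact by simpa using hmem
      rw [fwcSlice] at hc
      simp only [hc, Bool.not_false, if_true]
      constructor
      · intro h; exact absurd h (by simp)
      · intro h; exact absurd (h j le_rfl hjn).1 hmem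

theorem fwc_window_length (str1 : String) (wl n i : Nat) :
    (fwcWindow str1 wl n i).length = n := by simp [fwcWindow]

theorem fwc_window_getElem (str1 : String) (wl n i k : Nat) (hk : k < n) :
    (fwcWindow str1 wl n i)[k]'(by simp [fwc_window_length, hk]) = fwcSlice str1 wl i k := by
  simp [fwcWindow]

theorem fwcGo_iff_perm (str1 : String) (words : List String) (wl i : Nat)
    (hn : 0 < words.length) :
    (fwcGo str1 (PySem.Dict.counter words) wl words.length i words.length 0 PySem.Dict.empty = true)
      ↔ (fwcWindow str1 wl words.length i).Perm words := by
  rw [fwcGo_iff str1 words wl i words.length 0 PySem.Dict.empty (by omega) hn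
    (by intro w; simp [PySem.Dict.getD_empty])]
  constructor
  · intro hT
    have haux : ∀ m, m ≤ words.length → ∀ w,
        ((fwcWindow str1 wl words.length i).take m).count w ≤ words.count w := by
      intro m
      induction m with
      | zero => simp
      | succ p ihp =>
        intro hm w
        rw [fwc_window_take_succ str1 wl words.length i p (by omega), List.count_append]
        by_cases hw : w = fwcSlice str1 wl i p
        · subst hw
          have h2 := (hT p (Nat.zero_le p) (by omega)).2
          rw [fwc_window_take_succ str1 wl words.length i p (by omega), List.count_append] at h2
          exact h2
        · have : ¬ (fwcSlice str1 wl i p = w) := fun h => hw h.symm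
          simp only [List.count_singleton]
          simpa [beq_iff_eq, this] using ihp (by omega) w
    have hcount : ∀ w, (fwcWindow str1 wl words.length i).count w ≤ words.count w := by
      intro w
      have := haux words.length le_rfl w
      rwa [List.take_of_length_le (le_of_eq (fwc_window_length str1 wl words.length i))] at this
    have hle : ((fwcWindow str1 wl words.length i) : Multiset String) ≤ (words : Multiset String) := by
      rw [Multiset.le_iff_count]
      intro a
      simpa [Multiset.coe_count] using hcount a
    have hcard : Multiset.card ((words : Multiset String)) ≤ Multiset.card ((fwcWindow str1 wl words.length i : List String) : Multiset String) := by
      simp [fwc_window_length]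
    have := Multiset.eq_of_le_of_card_le hle hcard
    exact Multiset.coe_eq_coe.mp this
  · intro hperm k _ hk
    have hkw : k < (fwcWindow str1 wl words.length i).length := by
      rw [fwc_window_length]; exact hk
    have hmemw : fwcSlice str1 wl i k ∈ fwcWindow str1 wl words.length i := by
      rw [← fwc_window_getElem str1 wl words.length i k hk]
      exact List.getElem_mem hkw
    refine ⟨hperm.mem_iff.mp hmemw, ?_⟩
    calc ((fwcWindow str1 wl words.length i).take (k + 1)).count (fwcSlice str1 wl i k)
        ≤ (fwcWindow str1 wl words.length i).count (fwcSlice str1 wl i k) :=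
          (List.take_sublist (k + 1) _).count_le _
      _ = words.count (fwcSlice str1 wl i k) := hperm.count_eq _


-- ===== VERDICT (by name: the statement is the Claim_ definition above) =====
theorem find_word_concatenation_spec : Claim_equal_find_word_concatenation := by
  intro str1 words _
  unfold Spec_find_word_concatenation find_word_concatenation find_word_concatenation_alt
  by_cases hguard : (words.length == 0 || (words.headD "").toList.length == 0) = true
  · rw [if_pos hguard, if_pos hguard]
  · rw [if_neg hguard, if_neg hguard]
    have hn : 0 < words.length := by
      by_contra h
      apply hguard
      simp only [Bool.or_eq_true, beq_iff_eq]
      left; omega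
    rw [fwc_wf_eq]
    apply PySem.List.foldl_congr_mem
    intro acc x _
    have hwin : ((List.range words.length).map (fun j =>
        PySem.Str.slice str1 (some ((x + j * (words.headD "").toList.length : Nat) : Int))
          (some ((x + j * (words.headD "").toList.length + (words.headD "").toList.length : Nat) : Int))))
        = fwcWindow str1 (words.headD "").toList.length words.length x := rfl
    rw [hwin]
    have hcond : fwcGo str1 (PySem.Dict.counter words) (words.headD "").toList.length words.length x
          words.length 0 PySem.Dict.empty
        = ((PySem.List.sorted (fwcWindow str1 (words.headD "").toList.length words.length x) (fun x => x) false)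
            == (PySem.List.sorted words (fun x => x) false)) := by
      rw [Bool.eq_iff_iff]
      rw [fwcGo_iff_perm str1 words (words.headD "").toList.length x hn]
      rw [beq_iff_eq, PySem.List.sorted_id_eq_sorted_id_iff_perm]
    rw [hcond]
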